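-- pv_equiv track=rewrite | github.com/kaviya9322/problem-solving | divisibility of 3.py | is_divisible_by_3
-- ===== SOURCE A (Python) =====
-- def is_divisible_by_3(arr):
--     digit_sum = 0     # Iterate through each number in the array
--     for num in arr:
--         while num > 0:
--             digit_sum += num % 10  # Add the last digit
--             num //= 10  # Remove the last digit
--     # Check if the sum of digits is divisible by 3
--     if digit_sum % 3 == 0:
--         return 1
--     else:
--         return 0
-- ===== SOURCE B (Python) =====
-- def is_divisible_by_3(arr):
--     # digit_sum(n) % 3 == n % 3 for n > 0, so sum the positive elements directly
--     return 1 if sum(n for n in arr if n > 0) % 3 == 0 else 0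
-- ===== Notes on version B (the rewrite author's own statement) =====
-- stated objective: faster
-- what changed: replaces the per-element digit-extraction while-loop with a single pass summing the positive elements and testing that sum mod 3, using digit_sum(n) == n (mod 3)
import Mathlib
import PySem

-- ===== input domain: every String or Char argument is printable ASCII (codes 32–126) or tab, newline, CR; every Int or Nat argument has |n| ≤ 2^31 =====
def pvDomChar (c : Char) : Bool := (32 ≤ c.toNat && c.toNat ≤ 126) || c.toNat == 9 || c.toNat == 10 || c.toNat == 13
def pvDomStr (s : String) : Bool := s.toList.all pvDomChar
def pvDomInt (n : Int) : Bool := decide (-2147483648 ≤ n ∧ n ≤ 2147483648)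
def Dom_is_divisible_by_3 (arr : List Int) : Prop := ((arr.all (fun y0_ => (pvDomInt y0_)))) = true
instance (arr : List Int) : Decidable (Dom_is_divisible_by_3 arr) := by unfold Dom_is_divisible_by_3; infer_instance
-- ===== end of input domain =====

-- B replaces A's per-element digit-extraction loop with a single sum of the positive
-- elements tested mod 3 (digit_sum(n) ≡ n (mod 3) for n > 0): asymptotically faster.


-- ===== PORT A =====
-- A's inner 'while num > 0' loop: peel the last digit with // and %
def digitLoop (num digit_sum : Int) : Int :=
  if h : num > 0 then
    digitLoop (PySem.Int.floordiv num 10) (digit_sum + PySem.Int.mod num 10)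
  else digit_sum
termination_by num.toNat
decreasing_by
  rw [PySem.Int.floordiv_eq_ediv_of_pos (by norm_num : (0:Int) < 10)]
  omega

def is_divisible_by_3 (arr : List Int) : Int :=
  let digit_sum := arr.foldl (fun ds num => digitLoop num ds) 0
  if PySem.Int.mod digit_sum 3 = 0 then 1 else 0

-- ===== PORT B =====
def is_divisible_by_3_alt (arr : List Int) : Int :=
  if PySem.Int.mod ((arr.filter (fun n => n > 0)).sum) 3 = 0 then 1 else 0

-- ===== PRECONDITION & SPEC =====
def Spec_is_divisible_by_3 (arr : List Int) (out : Int) : Prop := out = is_divisible_by_3_alt arr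
instance (arr : List Int) (out : Int) : Decidable (Spec_is_divisible_by_3 arr out) := by unfold Spec_is_divisible_by_3; infer_instance

-- ===== CLAIM (what is proved, stated in full; the proofs are below) =====
def Claim_equal_is_divisible_by_3 : Prop := ∀ (arr : List Int), Dom_is_divisible_by_3 arr → Spec_is_divisible_by_3 arr (is_divisible_by_3 arr)

-- ===== LEMMAS AND PROOFS =====

-- the digit loop preserves the accumulator + value, modulo 3
theorem digitLoop_emod3 (num digit_sum : Int) :
    digitLoop num digit_sum % 3 = (digit_sum + (if 0 < num then num else 0)) % 3 := by
  by_cases h : 0 < num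
  · rw [digitLoop]
    simp only [h, if_pos, dif_pos]
    rw [PySem.Int.floordiv_eq_ediv_of_pos (by norm_num : (0:Int) < 10),
        PySem.Int.mod_eq_emod_of_pos (by norm_num : (0:Int) < 10)]
    rw [digitLoop_emod3 (num / 10) (digit_sum + num % 10)]
    split_ifs with h2 <;> omega
  · rw [digitLoop]
    simp [h]
termination_by num.toNat
decreasing_by
  omega

theorem fold_emod3 (arr : List Int) : ∀ acc : Int,
    (arr.foldl (fun ds num => digitLoop num ds) acc) % 3
      = (acc + (arr.filter (fun n => n > 0)).sum) % 3 := by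
  induction arr with
  | nil => intro acc; simp
  | cons a l ih =>
    intro acc
    simp only [List.foldl_cons, List.filter_cons]
    rw [ih (digitLoop a acc)]
    have h := digitLoop_emod3 a acc
    by_cases ha : 0 < a
    · simp only [ha, if_pos, decide_true, List.sum_cons]
      simp only [ha, if_pos] at h
      omega
    · rw [if_neg ha] at h
      rw [if_neg (by simpa using ha)]
      omega

-- ===== VERDICT (by name: the statement is the Claim_ definition above) =====
theorem is_divisible_by_3_spec : Claim_equal_is_divisible_by_3 := by
  intro arr _
  have h := fold_emod3 arr 0
  simp only [Spec_is_divisible_by_3, is_divisible_by_3, is_divisible_by_3_alt,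
    PySem.Int.mod_eq_emod_of_pos (show (0:Int) < 3 by norm_num), h]
  simp
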